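-- pv_equiv track=rewrite | github.com/Aiden-Jeon/Algorithm | 14499.py | dice_move
-- ===== SOURCE A (Python) =====
-- def dice_move(dice,l):
-- 	result = []
-- 	if l==1:
-- 		for i in [4,2,1,6,5,3]:
-- 			result += [dice[i-1]]
-- 	if l==2:
-- 		for i in [3,2,6,1,5,4]:
-- 			result += [dice[i-1]]
-- 	if l==3:
-- 		for i in [5,1,3,4,6,2]:
-- 			result += [dice[i-1]]
-- 	if l==4:
-- 		for i in [2,6,3,4,1,5]:
-- 			result += [dice[i-1]]
-- 	return result
-- ===== SOURCE B (Python) =====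
-- def dice_move(dice, l):
--     if l not in (1, 2, 3, 4):
--         return []
--     # Rolling the die is a 4-cycle on the faces around the rotation axis;
--     # the two axis faces stay put.  East/West cycle positions 0->2->5->3,
--     # North/South cycle 0->1->5->4; the opposite direction is the reverse cycle.
--     cycle = [0, 2, 5, 3] if l <= 2 else [0, 1, 5, 4]
--     if l % 2 == 0:
--         cycle.reverse()
--     result = dice[:6]
--     for src, dst in zip(cycle, cycle[1:] + cycle[:1]):
--         result[dst] = dice[src]
--     return result
-- ===== Notes on version B (the rewrite author's own statement) =====
-- stated objective: alternative
-- what changed: Instead of gathering the output through one of four full 6-entry permutation tables, B copies the die and rotates the values along the single 4-cycle of face positions around the rotation axis (one cycle per axis, reversed for the opposite direction), leaving the two axis faces untouched.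
import Mathlib
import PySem

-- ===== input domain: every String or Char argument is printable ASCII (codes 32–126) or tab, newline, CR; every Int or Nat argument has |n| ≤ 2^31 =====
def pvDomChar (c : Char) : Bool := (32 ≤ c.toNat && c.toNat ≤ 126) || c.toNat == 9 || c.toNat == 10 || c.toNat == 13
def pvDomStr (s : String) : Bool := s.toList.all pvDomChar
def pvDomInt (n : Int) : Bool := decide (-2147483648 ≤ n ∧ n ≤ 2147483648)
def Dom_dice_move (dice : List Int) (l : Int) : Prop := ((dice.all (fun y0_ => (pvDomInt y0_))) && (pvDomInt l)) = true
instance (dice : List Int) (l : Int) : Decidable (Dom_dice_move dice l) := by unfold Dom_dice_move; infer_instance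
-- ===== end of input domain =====

-- B rotates a copy of the die along the single 4-cycle of positions around the
-- rotation axis (the two axis faces stay put) instead of gathering through one
-- of four full permutation tables (objective: alternative).
-- ===== PORT A =====
def dice_move (dice : List Int) (l : Int) : List Int :=
  let result : List Int := []
  let result := if l == 1 then
      [4,2,1,6,5,3].foldl (fun r i => r ++ [(PySem.List.pyGet? dice (i-1)).getD 0]) result
    else result
  let result := if l == 2 then
      [3,2,6,1,5,4].foldl (fun r i => r ++ [(PySem.List.pyGet? dice (i-1)).getD 0]) result
    else result
  let result := if l == 3 then
      [5,1,3,4,6,2].foldl (fun r i => r ++ [(PySem.List.pyGet? dice (i-1)).getD 0]) result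
    else result
  let result := if l == 4 then
      [2,6,3,4,1,5].foldl (fun r i => r ++ [(PySem.List.pyGet? dice (i-1)).getD 0]) result
    else result
  result

-- ===== PORT B =====
def dice_move_alt (dice : List Int) (l : Int) : List Int :=
  if l == 1 || l == 2 || l == 3 || l == 4 then
    let cycle : List Int := if l ≤ 2 then [0,2,5,3] else [0,1,5,4]
    let cycle := if PySem.Int.mod l 2 == 0 then cycle.reverse else cycle
    let result := PySem.List.slice dice none (some 6)   -- dice[:6]
    -- for src,dst in zip(cycle, cycle[1:]+cycle[:1]): result[dst] = dice[src]
    (cycle.zip (PySem.List.slice cycle (some 1) none ++ PySem.List.slice cycle none (some 1))).foldl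
      (fun r p => PySem.List.pySetD r p.2 ((PySem.List.pyGet? dice p.1).getD 0)) result
  else []

-- ===== PRECONDITION & SPEC =====
-- Pre_ excludes exactly the inputs where A raises IndexError: a direction 1..4 with fewer than 6 faces.
def Pre_dice_move (dice : List Int) (l : Int) : Prop := (1 ≤ l ∧ l ≤ 4) → 6 ≤ dice.length
instance (dice : List Int) (l : Int) : Decidable (Pre_dice_move dice l) := by unfold Pre_dice_move; infer_instance
def pvWitness_dice_move : List Int × Int := ([1,2,3,4,5,6], 1)
def Spec_dice_move (dice : List Int) (l : Int) (out : List Int) : Prop := out = dice_move_alt dice l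
instance (dice : List Int) (l : Int) (out : List Int) : Decidable (Spec_dice_move dice l out) := by unfold Spec_dice_move; infer_instance

-- ===== CLAIM =====
def Claim_equal_dice_move : Prop := ∀ (dice : List Int) (l : Int), Dom_dice_move dice l → Pre_dice_move dice l → Spec_dice_move dice l (dice_move dice l)

-- ===== LEMMAS AND PROOFS =====

-- ===== VERDICT =====
theorem dice_move_spec : Claim_equal_dice_move := by
  unfold Claim_equal_dice_move
  intro dice l _ hpre
  unfold Spec_dice_move dice_move dice_move_alt Pre_dice_move at *
  by_cases h14 : 1 ≤ l ∧ l ≤ 4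
  · have hlen := hpre h14
    match dice, hlen with
    | a :: b :: c :: d :: e :: f :: rest, _ =>
      obtain ⟨h1, h4⟩ := h14
      have hr : (0:Int) ≤ rest.length := Int.natCast_nonneg _
      interval_cases l <;>
        simp [PySem.List.pyGet?_of_nonneg, PySem.List.pySetD, PySem.List.pySet?,
              PySem.List.slice, PySem.Int.mod, PySem.List.clampIdx, PySem.List.pyIdx?, List.zip, List.set]
  · have h1 : l ≠ 1 := by omega
    have h2 : l ≠ 2 := by omega
    have h3 : l ≠ 3 := by omega
    have h4 : l ≠ 4 := by omega
    simp [h1, h2, h3, h4]
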